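-- pv_equiv track=rewrite | github.com/vivekvivian1294/Smart-Mirror | Smart Mirror/main.py | convert_start_gettime
-- ===== SOURCE A (Python) =====
-- def convert_start_gettime(args):
--     getTime = ''
--     flag = False
--     for str in args:
--         if str == '+':
--             break
--         if flag == True:
--             getTime += str
--         if str == 'T':
--             flag = True
--
--     return getTime
-- ===== SOURCE B (Python) =====
-- def convert_start_gettime(args):
--     # everything before the first '+', then everything after the first 'T' of that
--     return args.partition('+')[0].partition('T')[2]
-- ===== Notes on version B (the rewrite author's own statement) =====
-- stated objective: simpler
-- what changed: Replaces the flag-driven character accumulation loop (break on the plus sign, start collecting after the first T) by a locate-then-slice one-liner: partition at the first plus sign and take the part after the first T of that prefix.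
import Mathlib
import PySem

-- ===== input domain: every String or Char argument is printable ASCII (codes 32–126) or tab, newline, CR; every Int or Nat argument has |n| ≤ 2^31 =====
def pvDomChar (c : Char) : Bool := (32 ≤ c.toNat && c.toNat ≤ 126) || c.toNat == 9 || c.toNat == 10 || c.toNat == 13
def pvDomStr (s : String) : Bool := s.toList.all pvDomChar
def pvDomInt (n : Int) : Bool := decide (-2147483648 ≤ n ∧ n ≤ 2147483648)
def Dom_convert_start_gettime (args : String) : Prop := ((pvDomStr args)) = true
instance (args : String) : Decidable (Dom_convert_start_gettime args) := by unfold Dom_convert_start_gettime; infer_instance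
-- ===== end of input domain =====

-- B replaces A's flag-driven accumulation loop by partition-on-'+' then part-after-'T' (simpler, same cost).


-- ===== PORT A =====
-- the for-loop with break: state = (getTime as accumulated chars, flag)
def convertLoopA : List Char → List Char → Bool → List Char
  | [], acc, _ => acc
  | c :: rest, acc, flag =>
    if c = '+' then acc
    else convertLoopA rest (if flag then acc ++ [c] else acc) (if c = 'T' then true else flag)

def convert_start_gettime (args : String) : String :=
  String.ofList (convertLoopA args.toList [] false)

-- ===== PORT B =====
-- s.partition(sep)[0] for a ONE-CHAR sep c: exact (the chars before the first c; all of s if c absent)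
def partBefore (l : List Char) (c : Char) : List Char := l.takeWhile (· ≠ c)
-- s.partition(sep)[2] for a ONE-CHAR sep c: exact (the chars after the first c; '' if c absent)
def partAfter (l : List Char) (c : Char) : List Char :=
  if l.contains c then (l.dropWhile (· ≠ c)).tail else []

def convert_start_gettime_alt (args : String) : String :=
  String.ofList (partAfter (partBefore args.toList '+') 'T')

-- ===== PRECONDITION & SPEC =====
def Spec_convert_start_gettime (args : String) (out : String) : Prop := out = convert_start_gettime_alt args
instance (args : String) (out : String) : Decidable (Spec_convert_start_gettime args out) := by unfold Spec_convert_start_gettime; infer_instance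

-- ===== CLAIM (what is proved, stated in full; the proofs are below) =====
def Claim_equal_convert_start_gettime : Prop := ∀ (args : String), Dom_convert_start_gettime args → Spec_convert_start_gettime args (convert_start_gettime args)

-- ===== LEMMAS AND PROOFS =====

-- once the flag is set, A just collects everything up to the first '+'
theorem convertLoopA_true (l : List Char) (acc : List Char) :
    convertLoopA l acc true = acc ++ l.takeWhile (· ≠ '+') := by
  induction l generalizing acc with
  | nil => simp [convertLoopA]
  | cons c rest ih =>
    by_cases hc : c = '+'
    · simp [convertLoopA, hc, List.takeWhile]
    · simp [convertLoopA, hc, List.takeWhile, ih]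

theorem convertLoopA_false (l : List Char) (acc : List Char) :
    convertLoopA l acc false = acc ++ partAfter (partBefore l '+') 'T' := by
  induction l generalizing acc with
  | nil => simp [convertLoopA, partAfter, partBefore]
  | cons c rest ih =>
    by_cases hc : c = '+'
    · simp [convertLoopA, hc, partAfter, partBefore, List.takeWhile]
    · by_cases hT : c = 'T'
      · simp [convertLoopA, hc, hT, convertLoopA_true, partAfter, partBefore,
              List.takeWhile]
      · simp [convertLoopA, hc, hT, ih, partAfter, partBefore, List.takeWhile,
              List.dropWhile, Ne.symm hT]

-- ===== VERDICT (by name: the statement is the Claim_ definition above) =====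
theorem convert_start_gettime_spec : Claim_equal_convert_start_gettime := by
  intro args _
  unfold Spec_convert_start_gettime convert_start_gettime convert_start_gettime_alt
  rw [convertLoopA_false]
  simp
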